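-- pv_equiv track=rewrite | github.com/Cyd3nt/Personality-Profiler | human_personality_model.py | _analyze_social_orientation
-- ===== SOURCE A (Python) =====
-- def _analyze_social_orientation(text: str) -> str:
--     extroverted_keywords = {'people', 'social', 'together', 'group', 'talk'}
--     introverted_keywords = {'alone', 'quiet', 'private', 'space', 'solitude'}
--
--     words = text.lower().split()
--     extroverted_count = sum(1 for word in words if word in extroverted_keywords)
--     introverted_count = sum(1 for word in words if word in introverted_keywords)
--
--     if extroverted_count > introverted_count:
--         return "extroverted"
--     elif introverted_count > extroverted_count:
--         return "introverted"
--     return "ambivert"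
-- ===== SOURCE B (Python) =====
-- def _analyze_social_orientation(text: str) -> str:
--     counts = {}
--     for w in text.lower().split():
--         counts[w] = counts.get(w, 0) + 1
--     extroverted_count = sum(counts.get(w, 0) for w in ('people', 'social', 'together', 'group', 'talk'))
--     introverted_count = sum(counts.get(w, 0) for w in ('alone', 'quiet', 'private', 'space', 'solitude'))
--     if extroverted_count > introverted_count:
--         return "extroverted"
--     elif introverted_count > extroverted_count:
--         return "introverted"
--     return "ambivert"
-- ===== Notes on version B (the rewrite author's own statement) =====
-- stated objective: alternative
-- what changed: B builds a word-frequency dictionary in one pass and then sums the per-keyword counts by iterating over the two fixed keyword tuples, instead of A's two membership-scanning passes over the word list.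
import Mathlib
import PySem

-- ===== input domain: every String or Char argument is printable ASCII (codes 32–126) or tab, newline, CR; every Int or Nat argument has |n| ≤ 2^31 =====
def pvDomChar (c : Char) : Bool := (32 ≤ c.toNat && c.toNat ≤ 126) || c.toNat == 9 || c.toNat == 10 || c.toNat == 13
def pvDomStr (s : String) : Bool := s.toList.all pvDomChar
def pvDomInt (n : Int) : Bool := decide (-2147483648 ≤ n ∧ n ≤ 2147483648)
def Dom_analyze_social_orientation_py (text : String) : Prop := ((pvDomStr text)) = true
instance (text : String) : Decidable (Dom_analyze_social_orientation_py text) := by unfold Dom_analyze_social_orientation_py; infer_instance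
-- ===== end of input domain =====

-- B replaces A's two membership-counting passes over the word list by one frequency
-- dictionary pass plus sums over the fixed keyword tuples; objective: alternative.

-- ===== PORT A =====
def analyze_social_orientation_py (text : String) : String :=
  let extroverted_keywords : PySem.Set String :=
    PySem.Set.ofList ["people", "social", "together", "group", "talk"]
  let introverted_keywords : PySem.Set String :=
    PySem.Set.ofList ["alone", "quiet", "private", "space", "solitude"]
  let words := PySem.Str.split₀ (PySem.Str.lower text)
  let extroverted_count : Int :=
    words.foldl (fun acc w => if PySem.Set.contains extroverted_keywords w then acc + 1 else acc) 0
  let introverted_count : Int :=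
    words.foldl (fun acc w => if PySem.Set.contains introverted_keywords w then acc + 1 else acc) 0
  if extroverted_count > introverted_count then "extroverted"
  else if introverted_count > extroverted_count then "introverted"
  else "ambivert"

-- ===== PORT B =====
def analyze_social_orientation_py_alt (text : String) : String :=
  let counts : PySem.Dict String Int :=
    (PySem.Str.split₀ (PySem.Str.lower text)).foldl
      (fun d w => d.insert w (d.getD w 0 + 1)) PySem.Dict.empty
  let extroverted_count : Int :=
    (["people", "social", "together", "group", "talk"].map (fun w => counts.getD w 0)).sum
  let introverted_count : Int :=
    (["alone", "quiet", "private", "space", "solitude"].map (fun w => counts.getD w 0)).sum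
  if extroverted_count > introverted_count then "extroverted"
  else if introverted_count > extroverted_count then "introverted"
  else "ambivert"

-- ===== PRECONDITION & SPEC =====
def Spec_analyze_social_orientation_py (text : String) (out : String) : Prop := out = analyze_social_orientation_py_alt text
instance (text : String) (out : String) : Decidable (Spec_analyze_social_orientation_py text out) := by unfold Spec_analyze_social_orientation_py; infer_instance

-- ===== CLAIM (what is proved, stated in full; the proofs are below) =====
def Claim_equal_analyze_social_orientation_py : Prop := ∀ (text : String), Dom_analyze_social_orientation_py text → Spec_analyze_social_orientation_py text (analyze_social_orientation_py text)

-- ===== LEMMAS AND PROOFS =====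

-- counting words that lie in a 5-keyword set = summing the five individual counts
theorem countP_set_five (a b c d e : String) (ws : List String)
    (hnd : ([a, b, c, d, e] : List String).Nodup) :
    (ws.countP (PySem.Set.ofList [a, b, c, d, e]).contains : Int)
      = (ws.count a : Int) + ((ws.count b : Int) + ((ws.count c : Int) + ((ws.count d : Int) + (ws.count e : Int)))) := by
  induction ws with
  | nil => simp
  | cons w ws ih =>
    simp only [List.countP_cons, List.count_cons]
    by_cases h1 : w = a <;> by_cases h2 : w = b <;> by_cases h3 : w = c <;>
      by_cases h4 : w = d <;> by_cases h5 : w = e <;>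
      simp_all [PySem.Set.mem_ofList] <;> omega

theorem analyze_social_orientation_py_eq (text : String) :
    analyze_social_orientation_py text = analyze_social_orientation_py_alt text := by
  unfold analyze_social_orientation_py analyze_social_orientation_py_alt
  simp only [PySem.List.foldl_if_add_one, PySem.Dict.foldl_insert_getD_add_one_eq_counter,
    PySem.Dict.getD_counter, List.map_cons, List.map_nil, List.sum_cons, List.sum_nil,
    zero_add, add_zero]
  rw [countP_set_five "people" "social" "together" "group" "talk"
        (PySem.Str.split₀ (PySem.Str.lower text)) (by decide),
      countP_set_five "alone" "quiet" "private" "space" "solitude"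
        (PySem.Str.split₀ (PySem.Str.lower text)) (by decide)]

-- ===== VERDICT (by name: the statement is the Claim_ definition above) =====
theorem analyze_social_orientation_py_spec : Claim_equal_analyze_social_orientation_py := by
  intro text _
  exact analyze_social_orientation_py_eq text
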